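-- pv_equiv track=rewrite | github.com/hirogen317/codelibrary | procon/gcj2019/qualification/1.py | rid4
-- ===== SOURCE A (Python) =====
-- def rid4(x):
--     k = x
--     r_array = []
--     r1 = 0
--     while k > 0:
--         y = k % 10
--         if y == 4:
--             r_array.append(2)
--         else:
--             r_array.append(y)
--         k = k // 10
--     r_array.reverse()
--     for r in r_array:
--         r1 = r1 * 10 + r
--     return r1, x - r1
-- ===== SOURCE B (Python) =====
-- def rid4(x):
--     def f(k):
--         if k <= 0:
--             return 0
--         d = k % 10
--         return f(k // 10) * 10 + (2 if d == 4 else d)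
--     r1 = f(x)
--     return r1, x - r1
-- ===== Notes on version B (the rewrite author's own statement) =====
-- stated objective: simpler
-- what changed: A collects the transformed digits into a list, reverses it and re-accumulates in a second loop; B is a single recursion on the remaining quotient that builds r1 most-significant-first directly, with no intermediate list, no reverse and no second pass.
import Mathlib
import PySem

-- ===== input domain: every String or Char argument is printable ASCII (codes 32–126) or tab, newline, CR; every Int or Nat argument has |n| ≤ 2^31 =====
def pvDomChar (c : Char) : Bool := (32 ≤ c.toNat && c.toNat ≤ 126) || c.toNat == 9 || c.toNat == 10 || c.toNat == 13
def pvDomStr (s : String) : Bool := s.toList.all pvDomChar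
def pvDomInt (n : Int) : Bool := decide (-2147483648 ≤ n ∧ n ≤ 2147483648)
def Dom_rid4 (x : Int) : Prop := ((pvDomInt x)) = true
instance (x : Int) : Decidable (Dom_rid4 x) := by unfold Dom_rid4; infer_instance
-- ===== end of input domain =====

-- B replaces A's three passes (digit list, reverse, re-accumulate) by one direct recursion on the remaining quotient; objective: simpler.

-- ===== PORT A =====
-- the while loop: peel digits least-significant-first, appending the transformed digit.
-- fuel = bitLength x bounds the iteration count (k at least halves while 0 < k), so this is A's loop exactly.
def rid4Loop : Nat → Int → List Int → List Int
  | 0, _, acc => acc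
  | fuel + 1, k, acc =>
    if 0 < k then
      rid4Loop fuel (PySem.Int.floordiv k 10)
        (acc ++ [if PySem.Int.mod k 10 = 4 then (2 : Int) else PySem.Int.mod k 10])
    else acc

def rid4 (x : Int) : Int × Int :=
  let r_array := (rid4Loop (PySem.Int.bitLength x) x []).reverse
  let r1 := r_array.foldl (fun r1 r => r1 * 10 + r) 0
  (r1, x - r1)

-- ===== PORT B =====
-- fuel = bitLength x bounds the recursion depth (k at least halves while k > 0); B's recursion exactly.
def rid4AltF : Nat → Int → Int
  | 0, _ => 0
  | fuel + 1, k =>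
    if k ≤ 0 then 0
    else
      let d := PySem.Int.mod k 10
      rid4AltF fuel (PySem.Int.floordiv k 10) * 10 + (if d = 4 then 2 else d)

def rid4_alt (x : Int) : Int × Int :=
  let r1 := rid4AltF (PySem.Int.bitLength x) x
  (r1, x - r1)

-- ===== PRECONDITION & SPEC =====
def Spec_rid4 (x : Int) (out : Int × Int) : Prop := out = rid4_alt x
instance (x : Int) (out : Int × Int) : Decidable (Spec_rid4 x out) := by unfold Spec_rid4; infer_instance

-- ===== CLAIM (what is proved, stated in full; the proofs are below) =====
def Claim_equal_rid4 : Prop := ∀ (x : Int), Dom_rid4 x → Spec_rid4 x (rid4 x)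

-- ===== LEMMAS AND PROOFS =====

lemma rid4Loop_acc (fuel : Nat) (k : Int) (acc : List Int) :
    rid4Loop fuel k acc = acc ++ rid4Loop fuel k [] := by
  induction fuel generalizing k acc with
  | zero => simp [rid4Loop]
  | succ fuel ih =>
    by_cases h : 0 < k
    · simp only [rid4Loop, if_pos h, List.nil_append]
      rw [ih (PySem.Int.floordiv k 10)
          (acc ++ [if PySem.Int.mod k 10 = 4 then (2:Int) else PySem.Int.mod k 10]),
        ih (PySem.Int.floordiv k 10)
          ([if PySem.Int.mod k 10 = 4 then (2:Int) else PySem.Int.mod k 10])]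
      simp
    · simp [rid4Loop, if_neg h]

lemma rid4Loop_fold (fuel : Nat) (k : Int) (hf : k.toNat < 2 ^ fuel) :
    (rid4Loop fuel k []).reverse.foldl (fun r1 r => r1 * 10 + r) 0 = rid4AltF fuel k := by
  induction fuel generalizing k with
  | zero =>
    have : k ≤ 0 := by simp at hf; omega
    simp [rid4Loop, rid4AltF]
  | succ fuel ih =>
    by_cases h : 0 < k
    · have h10 : PySem.Int.floordiv k 10 = k / 10 := PySem.Int.floordiv_eq_ediv_of_pos (by omega)
      have hf' : (PySem.Int.floordiv k 10).toNat < 2 ^ fuel := by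
        have hP : 1 ≤ 2 ^ fuel := Nat.one_le_two_pow
        rw [pow_succ] at hf; omega
      simp only [rid4Loop, if_pos h, List.nil_append, rid4AltF, if_neg (by omega : ¬ k ≤ 0)]
      rw [rid4Loop_acc fuel (PySem.Int.floordiv k 10)
          ([if PySem.Int.mod k 10 = 4 then (2:Int) else PySem.Int.mod k 10])]
      simp only [List.reverse_append, List.reverse_singleton, List.foldl_append,
        List.foldl_cons, List.foldl_nil]
      rw [ih (PySem.Int.floordiv k 10) hf']
    · simp [rid4Loop, if_neg h, rid4AltF, if_pos (by omega : k ≤ 0)]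

-- ===== VERDICT (by name: the statement is the Claim_ definition above) =====
theorem rid4_spec : Claim_equal_rid4 := by
  intro x _
  unfold Spec_rid4 rid4 rid4_alt
  have hb : x.toNat < 2 ^ PySem.Int.bitLength x := by
    have := PySem.Int.lt_two_pow_bitLength x
    omega
  simp only [rid4Loop_fold (PySem.Int.bitLength x) x hb]
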